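-- pv_equiv track=rewrite | github.com/a-maksimov/stepik_algos | algorithms_longest_substring_without_vowels.py | longest_substring_without_vowels
-- ===== SOURCE A (Python) =====
-- def longest_substring_without_vowels(s):
--     vowels = "aeiou"
--     max_length = 0
--     res = ""
--     for sym in s:
--         if sym in vowels:
--             if len(res) > max_length:
--                 max_length = len(res)
--             res = ""
--         else:
--             res += sym
--
--     if len(res) > max_length:
--         max_length = len(res)
--
--     return max_length
-- ===== SOURCE B (Python) =====
-- def longest_substring_without_vowels(s):
--     cuts = [-1] + [i for i, c in enumerate(s) if c in "aeiou"] + [len(s)]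
--     return max(b - a - 1 for a, b in zip(cuts, cuts[1:]))
-- ===== Notes on version B (the rewrite author's own statement) =====
-- stated objective: idiomatic
-- what changed: Instead of A's running counter reset at each vowel, B collects the vowel positions (plus sentinels -1 and len(s)) and returns the maximum gap between consecutive positions via zip+max.
import Mathlib
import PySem

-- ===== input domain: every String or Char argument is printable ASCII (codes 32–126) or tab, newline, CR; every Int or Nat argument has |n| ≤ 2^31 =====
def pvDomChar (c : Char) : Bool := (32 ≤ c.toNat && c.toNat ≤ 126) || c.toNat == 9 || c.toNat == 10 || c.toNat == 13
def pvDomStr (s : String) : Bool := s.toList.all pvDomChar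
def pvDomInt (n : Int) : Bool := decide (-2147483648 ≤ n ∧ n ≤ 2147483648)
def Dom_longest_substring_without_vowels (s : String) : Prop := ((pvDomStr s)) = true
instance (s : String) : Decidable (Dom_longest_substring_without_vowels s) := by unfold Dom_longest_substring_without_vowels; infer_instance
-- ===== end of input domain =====

-- B replaces A's reset-on-vowel running counter by the gaps between consecutive vowel positions (alternative decomposition).

-- ===== PORT A =====
-- loop 'for sym in s' with state (max_length, res); the trailing 'if len(res) > max_length' is the base case
def pvLoopA : List Char → Int → List Char → Int
  | [], m, r => if (r.length : Int) > m then (r.length : Int) else m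
  | c :: cs, m, r =>
    if "aeiou".toList.contains c then
      pvLoopA cs (if (r.length : Int) > m then (r.length : Int) else m) []
    else
      pvLoopA cs m (r ++ [c])

def longest_substring_without_vowels (s : String) : Int := pvLoopA s.toList 0 []

-- ===== PORT B =====
def longest_substring_without_vowels_alt (s : String) : Int :=
  let cuts : List Int :=
    [-1] ++ ((PySem.List.enumerate s.toList 0).filter
                (fun p => "aeiou".toList.contains p.2)).map (fun p => p.1)
         ++ [(s.toList.length : Int)]
  match (cuts.zip cuts.tail).map (fun p => p.2 - p.1 - 1) with
  | [] => 0            -- unreachable (cuts always has ≥ 2 elements); Python's max would raise here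
  | v :: vs => vs.foldl max v

-- ===== PRECONDITION & SPEC =====
def Spec_longest_substring_without_vowels (s : String) (out : Int) : Prop := out = longest_substring_without_vowels_alt s
instance (s : String) (out : Int) : Decidable (Spec_longest_substring_without_vowels s out) := by unfold Spec_longest_substring_without_vowels; infer_instance

-- ===== CLAIM (what is proved, stated in full; the proofs are below) =====
def Claim_equal_longest_substring_without_vowels : Prop := ∀ (s : String), Dom_longest_substring_without_vowels s → Spec_longest_substring_without_vowels s (longest_substring_without_vowels s)

-- ===== LEMMAS AND PROOFS =====

-- longest non-vowel run of cs, with the first run extended by k characters on the left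
def pvL : Int → List Char → Int
  | k, [] => k
  | k, c :: cs => if "aeiou".toList.contains c then max k (pvL 0 cs) else pvL (k + 1) cs

-- vowel positions of cs when its first character sits at index off
def pvI : Int → List Char → List Int
  | off, [] => []
  | off, c :: cs => if "aeiou".toList.contains c then off :: pvI (off + 1) cs else pvI (off + 1) cs

-- max over gaps between consecutive cut points prev, l…, e
def pvM (prev : Int) : List Int → Int → Int
  | [], e => e - prev - 1
  | c :: cs, e => max (c - prev - 1) (pvM c cs e)

def pvGaps (l : List Int) : List Int := (l.zip l.tail).map (fun p => p.2 - p.1 - 1)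

def pvMax1 : List Int → Int
  | [] => 0
  | v :: vs => vs.foldl max v

lemma pvLoopA_eq (cs : List Char) : ∀ (m : Int) (r : List Char),
    pvLoopA cs m r = max m (pvL (r.length : Int) cs) := by
  induction cs with
  | nil =>
    intro m r
    simp only [pvLoopA, pvL]
    split_ifs <;> omega
  | cons c cs ih =>
    intro m r
    simp only [pvLoopA, pvL]
    by_cases h : "aeiou".toList.contains c = true
    · rw [if_pos h, if_pos h, ih]
      simp only [List.length_nil, Nat.cast_zero]
      generalize pvL 0 cs = x
      simp only [max_def]
      split_ifs <;> omega
    · rw [if_neg h, if_neg h, ih]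
      have hlen : (((r ++ [c]).length : ℕ) : ℤ) = (r.length : ℤ) + 1 := by
        simp
      rw [hlen]

lemma pvL_ge (cs : List Char) : ∀ k : Int, k ≤ pvL k cs := by
  induction cs with
  | nil => intro k; simp [pvL]
  | cons c cs ih =>
    intro k
    simp only [pvL]
    by_cases h : "aeiou".toList.contains c = true
    · rw [if_pos h]; exact le_max_left _ _
    · rw [if_neg h]; have := ih (k + 1); omega

lemma pvI_eq (cs : List Char) : ∀ off : Int,
    ((PySem.List.enumerate cs off).filter (fun p => "aeiou".toList.contains p.2)).map
      (fun p => p.1) = pvI off cs := by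
  induction cs with
  | nil => intro off; simp [PySem.List.enumerate_nil, pvI]
  | cons c cs ih =>
    intro off
    rw [PySem.List.enumerate_cons, List.filter_cons]
    simp only [pvI]
    by_cases h : "aeiou".toList.contains c = true
    · rw [if_pos h, if_pos h, List.map_cons, ih]
    · rw [if_neg h, if_neg h, ih]

lemma foldl_max_comm (l : List Int) : ∀ a b : Int, l.foldl max (max a b) = max a (l.foldl max b) := by
  induction l with
  | nil => intro a b; simp
  | cons x xs ih => intro a b; simp only [List.foldl, max_assoc, ih]

lemma pvMax1_cons (x : Int) (l : List Int) (h : l ≠ []) :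
    pvMax1 (x :: l) = max x (pvMax1 l) := by
  obtain ⟨y, ys, rfl⟩ := List.exists_cons_of_ne_nil h
  simp [pvMax1, List.foldl, foldl_max_comm]

lemma pvGaps_cons (a b : Int) (l : List Int) :
    pvGaps (a :: b :: l) = (b - a - 1) :: pvGaps (b :: l) := by
  simp [pvGaps]

lemma pvMax1_pvGaps (l : List Int) : ∀ prev e : Int,
    pvMax1 (pvGaps (prev :: (l ++ [e]))) = pvM prev l e := by
  induction l with
  | nil => intro prev e; simp [pvGaps, pvMax1, pvM]
  | cons c cs ih =>
    intro prev e
    rw [List.cons_append, pvGaps_cons, pvMax1_cons, ih, pvM]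
    have : (pvGaps (c :: (cs ++ [e]))).length = (cs ++ [e]).length := by
      simp [pvGaps]
    intro hnil
    rw [hnil] at this
    simp at this

lemma pvM_eq_pvL (cs : List Char) : ∀ off k : Int,
    pvM (off - k - 1) (pvI off cs) (off + (cs.length : Int)) = pvL k cs := by
  induction cs with
  | nil => intro off k; simp [pvI, pvM, pvL]; ring
  | cons c cs ih =>
    intro off k
    have h2 : off + ((c :: cs).length : Int) = (off + 1) + (cs.length : Int) := by
      simp; ring
    simp only [pvI, pvL]
    by_cases h : "aeiou".toList.contains c = true
    · rw [if_pos h, if_pos h, pvM, h2]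
      have h4 : pvM off (pvI (off + 1) cs) ((off + 1) + (cs.length : Int)) = pvL 0 cs := by
        have h5 := ih (off + 1) 0
        have h6 : (off + 1) - 0 - 1 = off := by ring
        rwa [h6] at h5
      rw [h4]
      have h1 : off - (off - k - 1) - 1 = k := by ring
      rw [h1]
    · rw [if_neg h, if_neg h, h2]
      have h3 : off - k - 1 = (off + 1) - (k + 1) - 1 := by ring
      rw [h3, ih (off + 1) (k + 1)]

lemma alt_eq' (s : String) :
    longest_substring_without_vowels_alt s =
      pvMax1 (pvGaps ((-1 : Int) :: (pvI 0 s.toList ++ [(s.toList.length : Int)]))) := by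
  unfold longest_substring_without_vowels_alt
  rw [pvI_eq]
  rfl

lemma alt_eq (s : String) :
    longest_substring_without_vowels_alt s = pvL 0 s.toList := by
  rw [alt_eq', pvMax1_pvGaps]
  have h := pvM_eq_pvL s.toList 0 0
  have h1 : (0 : Int) - 0 - 1 = -1 := by ring
  have h2 : (0 : Int) + (s.toList.length : Int) = (s.toList.length : Int) := by ring
  rwa [h1, h2] at h

-- ===== VERDICT (by name: the statement is the Claim_ definition above) =====
theorem longest_substring_without_vowels_spec : Claim_equal_longest_substring_without_vowels := by
  intro s _
  unfold Spec_longest_substring_without_vowels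
  rw [alt_eq]
  unfold longest_substring_without_vowels
  rw [pvLoopA_eq]
  have := pvL_ge s.toList 0
  simp
  omega
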